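-- pv_equiv track=rewrite | github.com/aliashraf6649/Triangle | loops.py | is_triangular
-- ===== SOURCE A (Python) =====
-- def is_triangular(arr):
--     n = len(arr)
--
--     for i in range(n):
--         for j in range(i+1, n):
--             for k in range(j+1, n):
--                 if arr[i] + arr[j] > arr[k] and arr[i] + arr[k] > arr[j] and arr[j] + arr[k] > arr[i]:
--                     return 1
--
--     return 0
-- ===== SOURCE B (Python) =====
-- def is_triangular(arr):
--     s = sorted(arr)
--     for i in range(len(s) - 2):
--         if s[i] + s[i + 1] > s[i + 2]:
--             return 1
--     return 0
-- ===== Notes on version B (the rewrite author's own statement) =====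
-- stated objective: faster
-- what changed: Replaces the O(n^3) scan over all index triples by sorting the list once and checking only consecutive triples of the sorted list.
import Mathlib
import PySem

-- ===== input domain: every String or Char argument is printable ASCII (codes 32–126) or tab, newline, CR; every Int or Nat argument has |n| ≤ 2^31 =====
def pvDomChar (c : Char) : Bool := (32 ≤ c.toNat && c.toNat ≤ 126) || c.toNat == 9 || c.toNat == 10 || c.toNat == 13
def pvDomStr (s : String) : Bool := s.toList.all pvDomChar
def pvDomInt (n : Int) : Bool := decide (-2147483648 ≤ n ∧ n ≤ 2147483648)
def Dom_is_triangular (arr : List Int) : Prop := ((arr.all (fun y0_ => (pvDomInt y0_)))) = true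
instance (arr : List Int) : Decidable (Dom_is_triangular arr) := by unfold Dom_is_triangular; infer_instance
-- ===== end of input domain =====

-- B replaces A's O(n^3) scan over all index triples by sorting once and checking consecutive triples.

-- ===== PORT A =====
-- triple nested 'for' with early 'return 1': ported as nested List.any over the same ranges
def is_triangular (arr : List Int) : Int :=
  if (PySem.List.pyRange 0 (PySem.List.len arr) 1).any (fun i =>
       (PySem.List.pyRange (i+1) (PySem.List.len arr) 1).any (fun j =>
         (PySem.List.pyRange (j+1) (PySem.List.len arr) 1).any (fun k =>
           decide (PySem.List.pyGetD arr i 0 + PySem.List.pyGetD arr j 0 > PySem.List.pyGetD arr k 0 ∧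
                   PySem.List.pyGetD arr i 0 + PySem.List.pyGetD arr k 0 > PySem.List.pyGetD arr j 0 ∧
                   PySem.List.pyGetD arr j 0 + PySem.List.pyGetD arr k 0 > PySem.List.pyGetD arr i 0))))
  then 1 else 0

-- ===== PORT B =====
-- s = sorted(arr); scan consecutive triples with early 'return 1': ported as List.any
def is_triangular_alt (arr : List Int) : Int :=
  if (PySem.List.pyRange 0 (PySem.List.len (PySem.List.sorted arr (fun x => x) false) - 2) 1).any (fun i =>
       decide (PySem.List.pyGetD (PySem.List.sorted arr (fun x => x) false) i 0 +
               PySem.List.pyGetD (PySem.List.sorted arr (fun x => x) false) (i+1) 0 >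
               PySem.List.pyGetD (PySem.List.sorted arr (fun x => x) false) (i+2) 0))
  then 1 else 0

-- ===== PRECONDITION & SPEC =====
def Spec_is_triangular (arr : List Int) (out : Int) : Prop := out = is_triangular_alt arr
instance (arr : List Int) (out : Int) : Decidable (Spec_is_triangular arr out) := by unfold Spec_is_triangular; infer_instance

-- ===== CLAIM (what is proved, stated in full; the proofs are below) =====
def Claim_equal_is_triangular : Prop := ∀ (arr : List Int), Dom_is_triangular arr → Spec_is_triangular arr (is_triangular arr)

-- ===== LEMMAS AND PROOFS =====

-- the (symmetric) triangle condition on three values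
def triProp (x y z : Int) : Prop := x + y > z ∧ x + z > y ∧ y + z > x

-- triProp as a permutation-invariant statement: each element is less than the sum of the others
lemma tri_sum_iff (x y z : Int) :
    triProp x y z ↔ ∀ e ∈ ([x, y, z] : List Int), x + y + z > 2 * e := by
  unfold triProp
  constructor
  · intro h e he; simp at he; rcases he with rfl | rfl | rfl <;> omega
  · intro h
    have hx := h x (by simp); have hy := h y (by simp); have hz := h z (by simp)
    omega

lemma tri_perm {x y z a b c : Int} (h : ([a, b, c] : List Int).Perm [x, y, z])
    (ht : triProp x y z) : triProp a b c := by
  have hsum : a + b + c = x + y + z := by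
    have h' := h.sum_eq; simp at h'; omega
  rw [tri_sum_iff] at ht ⊢
  intro e he
  have hm : e ∈ ([x, y, z] : List Int) := (h.mem_iff).mp he
  have := ht e hm
  omega

-- "some 3 values picked in order form a triangle", as a sublist statement
def SubT (l : List Int) : Prop := ∃ x y z : Int, ([x, y, z] : List Int).Sublist l ∧ triProp x y z

-- SubT is invariant under permutation of the list
lemma subT_of_perm {l l' : List Int} (hp : l.Perm l') (h : SubT l) : SubT l' := by
  obtain ⟨x, y, z, hs, ht⟩ := h
  have hsp : ([x, y, z] : List Int).Subperm l' := hs.subperm.trans hp.subperm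
  obtain ⟨u, hu, hus⟩ := hsp
  have hlen : u.length = 3 := by simpa using hu.length_eq
  match u, hlen with
  | [a, b, c], _ =>
    exact ⟨a, b, c, hus, tri_perm hu ht⟩

-- extract strictly increasing positions from a 3-element sublist
lemma sublist3_indices {l : List Int} {x y z : Int} (h : ([x, y, z] : List Int).Sublist l) :
    ∃ p q r : Nat, ∃ (hp : p < l.length) (hq : q < l.length) (hr : r < l.length),
      p < q ∧ q < r ∧ l[p] = x ∧ l[q] = y ∧ l[r] = z := by
  obtain ⟨is, his, hpw⟩ := List.sublist_eq_map_getElem h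
  match is, his with
  | [p, q, r], heq =>
    simp only [List.map_cons, List.map_nil, List.cons.injEq, and_true] at heq
    obtain ⟨hx, hy, hz⟩ := heq
    have h1 : (p : Fin l.length) < q := by
      simp only [List.pairwise_cons] at hpw
      exact hpw.1 q (by simp)
    have h2 : (q : Fin l.length) < r := by
      simp only [List.pairwise_cons] at hpw
      exact hpw.2.1 r (by simp)
    exact ⟨p, q, r, p.isLt, q.isLt, r.isLt, h1, h2, hx.symm, hy.symm, hz.symm⟩

-- build the 3-element sublist from strictly increasing positions
lemma indices_sublist3 {l : List Int} {p q r : Nat} (hpq : p < q) (hqr : q < r)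
    (hp : p < l.length) (hq : q < l.length) (hr : r < l.length) :
    ([l[p], l[q], l[r]] : List Int).Sublist l := by
  have := List.map_getElem_sublist (l := l)
    (is := [⟨p, hp⟩, ⟨q, hq⟩, ⟨r, hr⟩])
    (by
      simp only [List.pairwise_cons, List.mem_cons, List.not_mem_nil, or_false]
      refine ⟨?_, ?_, ?_⟩
      · rintro a (rfl | rfl) <;> (rw [Fin.mk_lt_mk]; omega)
      · rintro a rfl; rw [Fin.mk_lt_mk]; omega
      · simp)
  simpa using this

-- A's result is 1 exactly when some ordered triple of positions forms a triangle
lemma A_eq_one_iff (arr : List Int) : is_triangular arr = 1 ↔ SubT arr := by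
  unfold is_triangular
  split
  · rename_i hc
    simp only [List.any_eq_true, PySem.List.mem_pyRange_one, decide_eq_true_eq,
      PySem.List.len_eq] at hc
    obtain ⟨i, ⟨hi0, hin⟩, j, ⟨hji, hjn⟩, k, ⟨hkj, hkn⟩, ht⟩ := hc
    constructor
    · intro _
      have hj0 : (0:Int) ≤ j := by omega
      have hk0 : (0:Int) ≤ k := by omega
      rw [PySem.List.pyGetD_eq_getElem arr (i := i) 0 hi0 (by omega),
          PySem.List.pyGetD_eq_getElem arr (i := j) 0 hj0 (by omega),
          PySem.List.pyGetD_eq_getElem arr (i := k) 0 hk0 (by omega)] at ht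
      exact ⟨_, _, _, indices_sublist3 (p := i.toNat) (q := j.toNat) (r := k.toNat)
        (by omega) (by omega) (by omega) (by omega) (by omega),
        ht.1, ht.2.1, ht.2.2⟩
    · intro _; rfl
  · rename_i hc
    constructor
    · intro h; omega
    · intro h
      exfalso; apply hc
      obtain ⟨x, y, z, hs, ht⟩ := h
      obtain ⟨p, q, r, hp, hq, hr, hpq, hqr, hx, hy, hz⟩ := sublist3_indices hs
      simp only [List.any_eq_true, PySem.List.mem_pyRange_one, decide_eq_true_eq,
        PySem.List.len_eq]
      refine ⟨(p : Int), ⟨by omega, by omega⟩, (q : Int), ⟨by omega, by omega⟩,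
        (r : Int), ⟨by omega, by omega⟩, ?_⟩
      rw [PySem.List.pyGetD_eq_getElem arr (i := p) 0 (by omega) (by omega),
          PySem.List.pyGetD_eq_getElem arr (i := q) 0 (by omega) (by omega),
          PySem.List.pyGetD_eq_getElem arr (i := r) 0 (by omega) (by omega)]
      simp only [Int.toNat_natCast]
      rw [hx, hy, hz]
      exact ⟨ht.1, ht.2.1, ht.2.2⟩

-- B's result is 1 exactly when the sorted list contains a triangular triple (as a sublist)
lemma B_eq_one_iff (arr : List Int) :
    is_triangular_alt arr = 1 ↔ SubT (PySem.List.sorted arr (fun x => x) false) := by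
  unfold is_triangular_alt
  set s := PySem.List.sorted arr (fun x => x) false with hs
  split
  · rename_i hc
    simp only [List.any_eq_true, PySem.List.mem_pyRange_one, decide_eq_true_eq,
      PySem.List.len_eq] at hc
    obtain ⟨i, ⟨hi0, hin⟩, ht⟩ := hc
    constructor
    · intro _
      rw [PySem.List.pyGetD_eq_getElem s (i := i) 0 hi0 (by omega),
          PySem.List.pyGetD_eq_getElem s (i := (i+1)) 0 (by omega) (by omega),
          PySem.List.pyGetD_eq_getElem s (i := (i+2)) 0 (by omega) (by omega)] at ht
      have e1 : (i+1).toNat = i.toNat + 1 := by omega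
      have e2 : (i+2).toNat = i.toNat + 2 := by omega
      simp only [e1, e2] at ht
      have h12 : s[i.toNat]'(by omega) ≤ s[i.toNat+1]'(by omega) := by
        exact PySem.List.sorted_id_getElem_mono arr (by omega) (by rw [← hs]; omega)
      have h23 : s[i.toNat+1]'(by omega) ≤ s[i.toNat+2]'(by omega) := by
        exact PySem.List.sorted_id_getElem_mono arr (by omega) (by rw [← hs]; omega)
      exact ⟨_, _, _, indices_sublist3 (p := i.toNat) (q := i.toNat+1) (r := i.toNat+2)
        (by omega) (by omega) (by omega) (by omega) (by omega),
        ht, by omega, by omega⟩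
    · intro _; rfl
  · rename_i hc
    constructor
    · intro h; omega
    · intro h
      exfalso; apply hc
      obtain ⟨x, y, z, hsub, ht⟩ := h
      obtain ⟨p, q, r, hp, hq, hr, hpq, hqr, hx, hy, hz⟩ := sublist3_indices hsub
      have hr2 : 2 ≤ r := by omega
      have h1 : s[p] ≤ s[r-2]'(by omega) := by
        exact PySem.List.sorted_id_getElem_mono arr (by omega) (by rw [← hs]; omega)
      have h2 : s[q] ≤ s[r-1]'(by omega) := by
        exact PySem.List.sorted_id_getElem_mono arr (by omega) (by rw [← hs]; omega)
      simp only [List.any_eq_true, PySem.List.mem_pyRange_one, decide_eq_true_eq,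
        PySem.List.len_eq]
      refine ⟨((r:Int) - 2), ⟨by omega, by omega⟩, ?_⟩
      rw [PySem.List.pyGetD_eq_getElem s (i := ((r:Int)-2)) 0 (by omega) (by omega),
          PySem.List.pyGetD_eq_getElem s (i := ((r:Int)-2+1)) 0 (by omega) (by omega),
          PySem.List.pyGetD_eq_getElem s (i := ((r:Int)-2+2)) 0 (by omega) (by omega)]
      have e0 : ((r:Int) - 2).toNat = r - 2 := by omega
      have e1 : ((r:Int) - 2 + 1).toNat = r - 1 := by omega
      have e2 : ((r:Int) - 2 + 2).toNat = r := by omega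
      simp only [e0, e1, e2]
      have hxy : x + y > z := ht.1
      rw [← hx, ← hy, ← hz] at hxy
      omega

lemma A_zero_or_one (arr : List Int) : is_triangular arr = 1 ∨ is_triangular arr = 0 := by
  unfold is_triangular; split <;> simp

lemma B_zero_or_one (arr : List Int) :
    is_triangular_alt arr = 1 ∨ is_triangular_alt arr = 0 := by
  unfold is_triangular_alt; split <;> simp

lemma main_eq (arr : List Int) : is_triangular arr = is_triangular_alt arr := by
  have hperm : arr.Perm (PySem.List.sorted arr (fun x => x) false) :=
    (PySem.List.sorted_perm arr (fun x => x) false).symm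
  by_cases h : SubT arr
  · rw [(A_eq_one_iff arr).mpr h, (B_eq_one_iff arr).mpr (subT_of_perm hperm h)]
  · have hA : is_triangular arr = 0 := by
      rcases A_zero_or_one arr with h1 | h0
      · exact absurd ((A_eq_one_iff arr).mp h1) h
      · exact h0
    have hB : is_triangular_alt arr = 0 := by
      rcases B_zero_or_one arr with h1 | h0
      · exact absurd (subT_of_perm hperm.symm ((B_eq_one_iff arr).mp h1)) h
      · exact h0
    rw [hA, hB]

-- ===== VERDICT (by name: the statement is the Claim_ definition above) =====
theorem is_triangular_spec : Claim_equal_is_triangular := by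
  intro arr _
  unfold Spec_is_triangular
  exact main_eq arr
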